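-- pv_equiv track=rewrite | github.com/roopepal/aoc23 | 3/3_2.py | num_coords
-- ===== SOURCE A (Python) =====
-- def num_coords(line, y):
--     nums_with_coords = []
--     num = ''
--     in_num = False
--     line = line + '.' # fix numbers at line ends
--     for i, c in enumerate(line):
--         if c.isdigit():
--             in_num = True
--             num += c
--         else:
--             if not in_num: continue
--             coords = [(x, y) for x in range(i - len(num), i)]
--             nums_with_coords.append((int(num), coords))
--             in_num = False
--             num = ''
--     return nums_with_coords
-- ===== SOURCE B (Python) =====
-- def num_coords(line, y):
--     res = []
--     n = len(line)
--     i = 0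
--     while i < n:
--         if line[i].isdigit():
--             j = i
--             while j < n and line[j].isdigit():
--                 j += 1
--             res.append((int(line[i:j]), [(x, y) for x in range(i, j)]))
--             i = j
--         else:
--             i += 1
--     return res
-- ===== Notes on version B (the rewrite author's own statement) =====
-- stated objective: simpler
-- what changed: Replaces the per-character in_num state machine with its digit-string accumulator and the appended '.' flush sentinel by a two-pointer scan that finds each maximal digit run [i,j) directly and emits (int(line[i:j]), coords) in one step.
import Mathlib
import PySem

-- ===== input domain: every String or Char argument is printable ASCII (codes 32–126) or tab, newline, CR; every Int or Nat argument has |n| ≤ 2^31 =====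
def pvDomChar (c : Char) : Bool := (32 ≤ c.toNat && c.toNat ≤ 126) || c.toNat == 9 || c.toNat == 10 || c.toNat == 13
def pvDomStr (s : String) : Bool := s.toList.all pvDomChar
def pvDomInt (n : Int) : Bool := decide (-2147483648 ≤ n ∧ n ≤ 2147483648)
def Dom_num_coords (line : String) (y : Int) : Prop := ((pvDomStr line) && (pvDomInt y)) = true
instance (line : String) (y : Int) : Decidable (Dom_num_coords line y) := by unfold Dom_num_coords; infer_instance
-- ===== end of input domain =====

-- B replaces A's per-character in_num state machine (digit accumulator + appended '.' flush
-- sentinel) by a two-pointer scan emitting each maximal digit run directly; same O(n) cost.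

-- ===== PORT A =====
-- loop over enumerate(line + '.') with state (res, num, in_num); num kept as List Char
-- (Python builds it as a string by +=); int(num) ported as PySem.Int.ofChars? with .getD 0
-- (num is always a nonempty digit string at the flush, so ofChars? is some there).
def goA (y : Int) : List Char → Int → List (Int × List (Int × Int)) → List Char → Bool →
    List (Int × List (Int × Int))
  | [], _, res, _, _ => res
  | c :: cs, i, res, num, in_num =>
    if PySem.Chars.isdigit c then
      goA y cs (i + 1) res (num ++ [c]) true
    else if !in_num then
      goA y cs (i + 1) res num in_num
    else
      goA y cs (i + 1)
        (res ++ [((PySem.Int.ofChars? num).getD 0,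
                  (PySem.List.pyRange (i - num.length) i 1).map (fun x => (x, y)))])
        [] false

def num_coords (line : String) (y : Int) : List (Int × (List (Int × Int))) :=
  goA y (line ++ ".").toList 0 [] [] false

-- ===== PORT B =====
-- two-pointer scan: the inner `while j < n and line[j].isdigit()` is takeWhile, the slice
-- line[i:j] is exactly that digit run, and the outer loop resumes at j (dropWhile).
def goB (y : Int) : List Char → Int → List (Int × List (Int × Int))
  | [], _ => []
  | c :: rest, i =>
    if PySem.Chars.isdigit c then
      let ds := (c :: rest).takeWhile PySem.Chars.isdigit
      ((PySem.Int.ofChars? ds).getD 0,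
       (PySem.List.pyRange i (i + ds.length) 1).map (fun x => (x, y))) ::
        goB y ((c :: rest).dropWhile PySem.Chars.isdigit) (i + ds.length)
    else
      goB y rest (i + 1)
  termination_by cs _ => cs.length
  decreasing_by
  · simp only [List.dropWhile_cons, *]
    exact Nat.lt_succ_of_le (List.dropWhile_sublist _).length_le
  · simp

def num_coords_alt (line : String) (y : Int) : List (Int × (List (Int × Int))) :=
  goB y line.toList 0

-- ===== PRECONDITION & SPEC =====
def Spec_num_coords (line : String) (y : Int) (out : List (Int × (List (Int × Int)))) : Prop := out = num_coords_alt line y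
instance (line : String) (y : Int) (out : List (Int × (List (Int × Int)))) : Decidable (Spec_num_coords line y out) := by unfold Spec_num_coords; infer_instance

-- ===== CLAIM (what is proved, stated in full; the proofs are below) =====
def Claim_equal_num_coords : Prop := ∀ (line : String) (y : Int), Dom_num_coords line y → Spec_num_coords line y (num_coords line y)

-- ===== LEMMAS AND PROOFS =====

lemma dropWhile_head_false {α : Type} {p : α → Bool} :
    ∀ (l : List α) (r : α) (tl' : List α), List.dropWhile p l = r :: tl' → p r = false := by
  intro l
  induction l with
  | nil => simp [List.dropWhile]
  | cons a l ih =>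
    intro r tl' h
    by_cases hp : p a
    · simp only [List.dropWhile_cons, hp] at h
      exact ih r tl' h
    · have hp' : p a = false := by simp [hp]
      simp only [List.dropWhile_cons, hp', Bool.false_eq_true, if_false, List.cons.injEq] at h
      rw [← h.1]
      exact hp'

-- consuming an all-digit block while already in a number appends it to num
lemma goA_digits_true (y : Int) : ∀ (ds : List Char),
    (∀ c ∈ ds, PySem.Chars.isdigit c = true) → ∀ (rest : List Char) (i : Int) res num,
    goA y (ds ++ rest) i res num true = goA y rest (i + ds.length) res (num ++ ds) true := by
  intro ds
  induction ds with
  | nil => intro _ rest i res num; simp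
  | cons d ds ih =>
    intro h rest i res num
    have hd : PySem.Chars.isdigit d = true := h d (List.mem_cons_self ..)
    simp only [List.cons_append, goA, hd]
    rw [ih (fun c hc => h c (List.mem_cons_of_mem _ hc)) rest (i + 1) res (num ++ [d])]
    rw [show i + 1 + (ds.length : Int) = i + ((d :: ds).length : Int) by
          push_cast [List.length_cons]; ring,
        ← List.append_cons]
    simp

-- entering a nonempty digit block from the clean state
lemma goA_digit_block (y : Int) (ds : List Char) (hne : ds ≠ [])
    (hall : ∀ c ∈ ds, PySem.Chars.isdigit c = true) (rest : List Char) (i : Int) (res : List (Int × List (Int × Int))) :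
    goA y (ds ++ rest) i res [] false = goA y rest (i + ds.length) res ds true := by
  cases ds with
  | nil => cases hne rfl
  | cons d ds' =>
    have hd : PySem.Chars.isdigit d = true := hall d (List.mem_cons_self ..)
    simp only [List.cons_append, goA, hd, List.nil_append]
    rw [goA_digits_true y ds' (fun c hc => hall c (List.mem_cons_of_mem _ hc)) rest (i + 1) res [d]]
    rw [show i + 1 + (ds'.length : Int) = i + ((d :: ds').length : Int) by
          push_cast [List.length_cons]; ring,
        List.singleton_append]
    simp

lemma key (y : Int) : ∀ (n : Nat) (cs : List Char), cs.length ≤ n → ∀ (i : Int) res,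
    goA y (cs ++ ['.']) i res [] false = res ++ goB y cs i := by
  have hdot : PySem.Chars.isdigit '.' = false := by decide
  intro n
  induction n with
  | zero =>
    intro cs hcs i res
    have : cs = [] := List.length_eq_zero_iff.mp (Nat.le_zero.mp hcs)
    subst this
    simp [goA, goB, hdot]
  | succ n ih =>
    intro cs hcs i res
    cases hcase : cs with
    | nil => simp [goA, goB, hdot]
    | cons c rest =>
      subst hcase
      by_cases hd : PySem.Chars.isdigit c = true
      · -- digit run at the front
        have hsplit : (c :: rest).takeWhile PySem.Chars.isdigit ++ (c :: rest).dropWhile PySem.Chars.isdigit = c :: rest :=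
          List.takeWhile_append_dropWhile
        have hne : (c :: rest).takeWhile PySem.Chars.isdigit ≠ [] := by
          simp [hd]
        have hall : ∀ x ∈ (c :: rest).takeWhile PySem.Chars.isdigit, PySem.Chars.isdigit x = true :=
          fun x hx => List.mem_takeWhile_imp hx
        have hA : goA y ((c :: rest) ++ ['.']) i res [] false
            = goA y ((c :: rest).dropWhile PySem.Chars.isdigit ++ ['.'])
                (i + ((c :: rest).takeWhile PySem.Chars.isdigit).length) res
                ((c :: rest).takeWhile PySem.Chars.isdigit) true := by
          conv_lhs => rw [← hsplit, List.append_assoc]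
          exact goA_digit_block y _ hne hall _ i res
        have hB : goB y (c :: rest) i
            = ((PySem.Int.ofChars? ((c :: rest).takeWhile PySem.Chars.isdigit)).getD 0,
               (PySem.List.pyRange i (i + ((c :: rest).takeWhile PySem.Chars.isdigit).length) 1).map (fun x => (x, y))) ::
              goB y ((c :: rest).dropWhile PySem.Chars.isdigit)
                (i + ((c :: rest).takeWhile PySem.Chars.isdigit).length) := by
          rw [goB]; simp [hd]
        cases htlc : (c :: rest).dropWhile PySem.Chars.isdigit with
        | nil =>
          rw [hA, htlc, hB, htlc]
          simp [goA, goB, hdot, add_sub_cancel_right]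
        | cons r tl' =>
          have hr : PySem.Chars.isdigit r = false := dropWhile_head_false _ r tl' htlc
          have hlen : ((c :: rest).takeWhile PySem.Chars.isdigit).length + (r :: tl').length = rest.length + 1 := by
            have := congrArg List.length hsplit
            rw [htlc] at this
            simpa using this
          have htl'len : tl'.length ≤ n := by
            have h1 : 1 ≤ ((c :: rest).takeWhile PySem.Chars.isdigit).length :=
              List.length_pos_iff.mpr hne
            have h2 : rest.length ≤ n := by simpa using Nat.succ_le_succ_iff.mp hcs
            simp at hlen
            omega
          rw [hA, htlc, hB, htlc]
          simp only [List.cons_append, goA, hr, Bool.false_eq_true, if_false, Bool.not_true]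
          rw [ih tl' htl'len]
          rw [goB]
          simp [hr, add_sub_cancel_right]
      · -- non-digit head: both sides skip it
        have hd' : PySem.Chars.isdigit c = false := by simp [hd]
        have hrest : rest.length ≤ n := by simpa using Nat.succ_le_succ_iff.mp hcs
        simp only [List.cons_append, goA, hd', Bool.false_eq_true, if_false, Bool.not_false]
        rw [ih rest hrest, goB]
        simp [hd']

-- ===== VERDICT (by name: the statement is the Claim_ definition above) =====
theorem num_coords_spec : Claim_equal_num_coords := by
  intro line y _
  unfold Spec_num_coords num_coords num_coords_alt
  have h : (line ++ ".").toList = line.toList ++ ['.'] := by simp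
  rw [h, key y line.toList.length line.toList le_rfl 0 []]
  simp
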